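-- pv_equiv track=rewrite | github.com/wangtz19/network-dataset | doc_splitter.py | check_heading_match
-- ===== SOURCE A (Python) =====
-- def check_heading_match(heading_text, paragraphs, start_idx):
--     heading_text = heading_text.replace(" ", "")
--     paragraph = paragraphs[start_idx].replace(" ", "")
--     if heading_text == paragraph:
--         return True, start_idx
--     if heading_text.startswith(paragraph) and start_idx+1 < len(paragraphs):
--         heading_text = heading_text[len(paragraph):]
--         return check_heading_match(heading_text, paragraphs, start_idx+1)
--     return False, start_idx
-- ===== SOURCE B (Python) =====
-- def check_heading_match(heading_text, paragraphs, start_idx):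
--     ht = heading_text.replace(" ", "")
--     n = len(paragraphs)
--     for idx in range(start_idx, n):
--         p = paragraphs[idx].replace(" ", "")
--         if ht == p:
--             return True, idx
--         if not ht.startswith(p) or idx + 1 >= n:
--             return False, idx
--         ht = ht[len(p):]
--     raise IndexError("paragraph index out of range")
-- ===== Notes on version B (the rewrite author's own statement) =====
-- stated objective: simpler
-- what changed: Replaced A's tail recursion (which re-strips the heading on every call) by a single for-loop over range(start_idx, len(paragraphs)) that strips the heading once and threads the remaining heading text through the loop.
import Mathlib
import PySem

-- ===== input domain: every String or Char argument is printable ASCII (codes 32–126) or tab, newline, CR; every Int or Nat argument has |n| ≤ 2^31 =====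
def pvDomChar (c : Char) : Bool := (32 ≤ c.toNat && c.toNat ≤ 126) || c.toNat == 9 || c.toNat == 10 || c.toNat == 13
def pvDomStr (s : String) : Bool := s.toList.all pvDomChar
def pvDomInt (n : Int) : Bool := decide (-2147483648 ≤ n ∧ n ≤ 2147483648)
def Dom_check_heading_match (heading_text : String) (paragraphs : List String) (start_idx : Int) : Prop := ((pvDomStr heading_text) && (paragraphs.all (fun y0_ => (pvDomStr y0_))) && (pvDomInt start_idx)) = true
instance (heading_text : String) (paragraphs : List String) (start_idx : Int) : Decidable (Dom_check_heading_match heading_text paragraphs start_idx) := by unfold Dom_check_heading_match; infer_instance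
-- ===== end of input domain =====

-- B replaces A's tail recursion by a single for-loop over range(start_idx, len(paragraphs)),
-- stripping the heading text once instead of at every recursive call (objective: simpler decomposition).

-- ===== PORT A =====
-- A is a tail recursion whose index grows toward len(paragraphs); the fuel 2*len+1 merely
-- bounds that depth for Lean's termination checker and is never exhausted inside Pre_.
def check_heading_match_go (fuel : Nat) (heading_text : String) (paragraphs : List String) (start_idx : Int) : Bool × Int :=
  match fuel with
  | 0 => (false, start_idx)  -- unreachable when the initial index is in range
  | fuel' + 1 =>
    let ht := PySem.Str.replace heading_text " " ""
    match PySem.List.pyGet? paragraphs start_idx with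
    | none => (false, start_idx)  -- IndexError in Python; excluded by Pre_
    | some p0 =>
      let p := PySem.Str.replace p0 " " ""
      if ht == p then (true, start_idx)
      else if PySem.Str.startswith ht p && decide (start_idx + 1 < PySem.List.len paragraphs) then
        check_heading_match_go fuel' (PySem.Str.slice ht (some (PySem.Str.len p)) none) paragraphs (start_idx + 1)
      else (false, start_idx)

def check_heading_match (heading_text : String) (paragraphs : List String) (start_idx : Int) : Bool × Int :=
  check_heading_match_go (2 * paragraphs.length + 1) heading_text paragraphs start_idx

-- ===== PORT B =====
def pvStrip (s : String) : String := PySem.Str.replace s " " ""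

-- one iteration of B's for-loop; the state is 'still scanning with this heading rest' or 'returned'
def pvStep (paragraphs : List String) (n : Int) (st : String ⊕ (Bool × Int)) (idx : Int) : String ⊕ (Bool × Int) :=
  match st with
  | .inr done => .inr done
  | .inl ht =>
    let p := pvStrip (PySem.List.pyGetD paragraphs idx "")
    if ht == p then .inr (true, idx)
    else if !PySem.Str.startswith ht p || decide (n ≤ idx + 1) then .inr (false, idx)
    else .inl (PySem.Str.slice ht (some (PySem.Str.len p)) none)

def check_heading_match_alt (heading_text : String) (paragraphs : List String) (start_idx : Int) : Bool × Int :=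
  let n : Int := PySem.List.len paragraphs
  match (PySem.List.pyRange start_idx n 1).foldl (pvStep paragraphs n) (.inl (pvStrip heading_text)) with
  | .inr out => out
  | .inl _ => (false, start_idx)  -- loop fell through: Python B raises IndexError here (start_idx ≥ len); excluded by Pre_

-- ===== PRECONDITION & SPEC =====
-- A raises IndexError exactly when the initial index is out of range (Python negative indexing allowed).
def Pre_check_heading_match (heading_text : String) (paragraphs : List String) (start_idx : Int) : Prop :=
  PySem.Raise.InRange paragraphs.length start_idx
instance (heading_text : String) (paragraphs : List String) (start_idx : Int) : Decidable (Pre_check_heading_match heading_text paragraphs start_idx) := by unfold Pre_check_heading_match; infer_instance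

def pvWitness_check_heading_match : String × List String × Int := ("First heading", ["First", "head ing", "x"], 0)

def Spec_check_heading_match (heading_text : String) (paragraphs : List String) (start_idx : Int) (out : Bool × Int) : Prop := out = check_heading_match_alt heading_text paragraphs start_idx
instance (heading_text : String) (paragraphs : List String) (start_idx : Int) (out : Bool × Int) : Decidable (Spec_check_heading_match heading_text paragraphs start_idx out) := by unfold Spec_check_heading_match; infer_instance

-- ===== CLAIM (what is proved, stated in full; the proofs are below) =====
def Claim_equal_check_heading_match : Prop := ∀ (heading_text : String) (paragraphs : List String) (start_idx : Int), Dom_check_heading_match heading_text paragraphs start_idx → Pre_check_heading_match heading_text paragraphs start_idx → Spec_check_heading_match heading_text paragraphs start_idx (check_heading_match heading_text paragraphs start_idx)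

-- ===== LEMMAS AND PROOFS =====

-- replacing " " by "" removes exactly the spaces
theorem pvReplace_go_filter (fuel : Nat) (l acc : List Char) (h : l.length ≤ fuel) :
    PySem.Chars.replace.go [' '] [] fuel l acc = acc.reverse ++ l.filter (· ≠ ' ') := by
  induction fuel generalizing l acc with
  | zero =>
    have : l = [] := List.eq_nil_of_length_eq_zero (Nat.le_zero.mp h)
    subst this; simp [PySem.Chars.replace.go]
  | succ n ih =>
    cases l with
    | nil => simp [PySem.Chars.replace.go]
    | cons c t =>
      by_cases hc : c = ' '
      · subst hc
        simp only [PySem.Chars.replace.go, List.isPrefixOf, BEq.rfl, Bool.true_and, if_true,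
          List.length_singleton, List.drop_succ_cons, List.drop_zero, List.reverse_nil, List.nil_append]
        rw [ih t acc (by simpa using h)]
        simp
      · have hb : (' ' == c) = false := by simpa using fun he => hc he.symm
        simp only [PySem.Chars.replace.go, List.isPrefixOf, hb, Bool.false_and]
        rw [ih t (c :: acc) (by simpa using h)]
        simp [hc]

theorem pvStrip_toList (s : String) : (pvStrip s).toList = s.toList.filter (· ≠ ' ') := by
  have h : (" " : String).toList = [' '] := rfl
  have h2 : ("" : String).toList = [] := rfl
  rw [pvStrip, PySem.Str.toList_replace, h, h2, PySem.Chars.replace]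
  simp only [List.isEmpty_cons, if_false, Bool.false_eq_true]
  exact (pvReplace_go_filter s.toList.length s.toList [] (le_refl _)).trans (by simp)

theorem pvStrip_noSpace (s : String) : ' ' ∉ (pvStrip s).toList := by
  rw [pvStrip_toList]; simp

theorem pvStrip_eq_self (s : String) (h : ' ' ∉ s.toList) : pvStrip s = s := by
  have : (pvStrip s).toList = s.toList := by
    rw [pvStrip_toList, List.filter_eq_self]
    intro a ha
    simp only [ne_eq, decide_eq_true_eq]
    rintro rfl; exact h ha
  exact String.toList_inj.mp this

-- the suffix A passes to the recursive call is space-free whenever ht is space-free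
theorem pvSlice_noSpace (ht p : String) (h : ' ' ∉ ht.toList) :
    ' ' ∉ (PySem.Str.slice ht (some (PySem.Str.len p)) none).toList := by
  intro hmem
  have hmem' : ' ' ∈ PySem.List.slice ht.toList (some (PySem.Str.len p)) none := by
    simpa [PySem.Str.toList_slice] using hmem
  exact h (PySem.List.mem_of_mem_slice ht.toList _ _ hmem')

-- once the loop has returned, further iterations change nothing
theorem pvFoldl_inr (paragraphs : List String) (n : Int) (out : Bool × Int) (l : List Int) :
    l.foldl (pvStep paragraphs n) (.inr out) = .inr out := by
  induction l with
  | nil => rfl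
  | cons x xs ih => simpa [pvStep] using ih

-- the main correspondence: A's recursion equals B's loop started on the stripped heading,
-- and the loop always returns while the index is in range
theorem pvMain (paragraphs : List String) (fuel : Nat) :
    ∀ (i : Int) (ht : String), -(paragraphs.length : Int) ≤ i → i < (paragraphs.length : Int) →
      (paragraphs.length : Int) - i ≤ fuel →
      ∃ out, (PySem.List.pyRange i (PySem.List.len paragraphs) 1).foldl
          (pvStep paragraphs (PySem.List.len paragraphs)) (.inl (pvStrip ht)) = .inr out ∧
        check_heading_match_go fuel ht paragraphs i = out := by
  induction fuel with
  | zero => intro i ht hlo hhi hf; omega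
  | succ f ih =>
    intro i ht hlo hhi hf
    obtain ⟨p0, hp0⟩ : ∃ p0, PySem.List.pyGet? paragraphs i = some p0 := by
      rcases h : PySem.List.pyGet? paragraphs i with _ | p0
      · rw [PySem.List.pyGet?_eq_none_iff] at h
        exact absurd ⟨hlo, hhi⟩ h
      · exact ⟨p0, rfl⟩
    have hgetD : PySem.List.pyGetD paragraphs i "" = p0 := by
      simp [PySem.List.pyGetD, hp0]
    rw [show PySem.List.len paragraphs = (paragraphs.length : Int) from PySem.List.len_eq paragraphs]
    rw [PySem.List.pyRange_one_cons hhi]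
    simp only [List.foldl_cons, pvStep, hgetD]
    unfold check_heading_match_go
    rw [hp0]
    simp only [PySem.List.len_eq, pvStrip]
    by_cases heq : (PySem.Str.replace ht " " "" == PySem.Str.replace p0 " " "") = true
    · refine ⟨(true, i), ?_, ?_⟩
      · rw [if_pos heq, pvFoldl_inr]
      · rw [if_pos heq]
    · rw [if_neg heq, if_neg heq]
      by_cases hsw : PySem.Str.startswith (PySem.Str.replace ht " " "") (PySem.Str.replace p0 " " "") = true
      · by_cases hlt : i + 1 < (paragraphs.length : Int)
        · -- startswith holds and a next paragraph exists: both sides advance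
          have hge : ¬ ((paragraphs.length : Int) ≤ i + 1) := by omega
          simp only [hsw, hlt, hge, Bool.not_true, Bool.false_or, decide_true, decide_false,
            Bool.true_and, Bool.false_eq_true, if_false, if_true]
          set htnew := PySem.Str.slice (PySem.Str.replace ht " " "") (some (PySem.Str.len (PySem.Str.replace p0 " " ""))) none with hdef
          have hns : ' ' ∉ htnew.toList := pvSlice_noSpace _ _ (by simpa [pvStrip] using pvStrip_noSpace ht)
          obtain ⟨out, hfold, hgo⟩ := ih (i + 1) htnew (by omega) hlt (by omega)
          refine ⟨out, ?_, hgo⟩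
          rw [show pvStrip htnew = htnew from pvStrip_eq_self htnew hns] at hfold
          simpa [PySem.List.len_eq] using hfold
        · -- no next paragraph: both sides return (False, i)
          have hge : (paragraphs.length : Int) ≤ i + 1 := by omega
          simp only [hsw, hlt, hge, Bool.not_true, Bool.false_or, decide_true, decide_false,
            Bool.true_and, Bool.false_eq_true, if_false, if_true]
          exact ⟨(false, i), pvFoldl_inr _ _ _ _, rfl⟩
      · -- the stripped paragraph is not a prefix: both sides return (False, i)
        have hsw' : PySem.Str.startswith (PySem.Str.replace ht " " "") (PySem.Str.replace p0 " " "") = false :=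
          Bool.eq_false_iff.mpr hsw
        simp only [hsw', Bool.not_false, Bool.true_or, Bool.false_and, Bool.false_eq_true,
          if_false, if_true]
        exact ⟨(false, i), pvFoldl_inr _ _ _ _, rfl⟩

-- ===== VERDICT (by name: the statement is the Claim_ definition above) =====
theorem check_heading_match_spec : Claim_equal_check_heading_match := by
  intro heading_text paragraphs start_idx _hdom hpre
  unfold Spec_check_heading_match check_heading_match check_heading_match_alt
  obtain ⟨hlo, hhi⟩ := hpre
  obtain ⟨out, hfold, hgo⟩ := pvMain paragraphs (2 * paragraphs.length + 1) start_idx heading_text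
    hlo hhi (by push_cast; omega)
  simp only [PySem.List.len_eq] at hfold ⊢
  rw [hfold, hgo]
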